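-- pv_equiv track=rewrite | github.com/AhsanRaza-dev/Barakah-Flow-AI | fitrah_engine/scoring_logic.py | extract_sunnah_dna
-- ===== SOURCE A (Python) =====
-- _SUNNAH_DNA_MAP: dict[str, dict[str, str]] = {
--     "HP_01": {
--         "A": "consistent",   # Prays Fajr + Quran/zikr
--         "B": "basic",        # Prays then sleeps
--         "C": "irregular",    # Sometimes prays
--         "D": "developing",   # Usually misses Fajr
--     },
--     "HP_09": {
--         "A": "sunnah",       # Follows Sunnah health habits
--         "B": "aware",        # Some awareness, wants to improve
--         "C": "neglected",    # Busy life, little attention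
--         "D": "poor",         # Very little attention
--     },
--     "HP_12": {
--         "A": "sunnah",       # Isha + Surah Mulk/zikr then sleep
--         "B": "screen",       # Phone scroll then sleep
--         "C": "no_routine",   # No night routine
--         "D": "late_night",   # Stays up late, Fajr suffers
--     },
--     "HP_07": {
--         "A": "strong",       # Daily family time
--         "B": "moderate",     # Weekly contact
--         "C": "weak",         # Tries but falls short
--         "D": "disconnected", # Relationships have cooled
--     },
-- }
--
-- def extract_sunnah_dna(answers: list[dict]) -> dict:
--     """
--     Extract Sunnah DNA labels from specific profiler answers.
--     HP_01 → ibadah, HP_07 → social, HP_09 → eating, HP_12 → sleeping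
--     Returns string labels (consistent / sunnah / strong / …).
--     """
--     selected: dict[str, str] = {}
--     for ans in answers:
--         qid   = ans.get("question_id", "")
--         label = (ans.get("selected_label") or "").upper()
--         if qid in _SUNNAH_DNA_MAP:
--             selected[qid] = _SUNNAH_DNA_MAP[qid].get(label, "unknown")
--
--     return {
--         "ibadah":   selected.get("HP_01", "unknown"),
--         "eating":   selected.get("HP_09", "unknown"),
--         "sleeping": selected.get("HP_12", "unknown"),
--         "social":   selected.get("HP_07", "unknown"),
--     }
-- ===== SOURCE B (Python) =====
-- _SUNNAH_DNA_MAP: dict[str, dict[str, str]] = {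
--     "HP_01": {"A": "consistent", "B": "basic", "C": "irregular", "D": "developing"},
--     "HP_09": {"A": "sunnah", "B": "aware", "C": "neglected", "D": "poor"},
--     "HP_12": {"A": "sunnah", "B": "screen", "C": "no_routine", "D": "late_night"},
--     "HP_07": {"A": "strong", "B": "moderate", "C": "weak", "D": "disconnected"},
-- }
--
-- def extract_sunnah_dna(answers: list[dict]) -> dict:
--     # No accumulator dict at all: for each of the four fields, scan the answers
--     # BACKWARDS and take the first match (= Python's last-wins overwrite in A).
--     def find(qid: str) -> str:
--         for a in reversed(answers):
--             if a.get("question_id", "") == qid: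
--                 return _SUNNAH_DNA_MAP[qid].get(
--                     (a.get("selected_label") or "").upper(), "unknown")
--         return "unknown"
--     return {
--         "ibadah":   find("HP_01"),
--         "eating":   find("HP_09"),
--         "sleeping": find("HP_12"),
--         "social":   find("HP_07"),
--     }
-- ===== Notes on version B (the rewrite author's own statement) =====
-- stated objective: alternative
-- what changed: B drops A's accumulator dict entirely: for each of the four fixed questions it scans the answers in reverse and early-returns at the first match (the reverse-first match equals A's last-wins dict overwrite), translating the label only then.
import Mathlib
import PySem

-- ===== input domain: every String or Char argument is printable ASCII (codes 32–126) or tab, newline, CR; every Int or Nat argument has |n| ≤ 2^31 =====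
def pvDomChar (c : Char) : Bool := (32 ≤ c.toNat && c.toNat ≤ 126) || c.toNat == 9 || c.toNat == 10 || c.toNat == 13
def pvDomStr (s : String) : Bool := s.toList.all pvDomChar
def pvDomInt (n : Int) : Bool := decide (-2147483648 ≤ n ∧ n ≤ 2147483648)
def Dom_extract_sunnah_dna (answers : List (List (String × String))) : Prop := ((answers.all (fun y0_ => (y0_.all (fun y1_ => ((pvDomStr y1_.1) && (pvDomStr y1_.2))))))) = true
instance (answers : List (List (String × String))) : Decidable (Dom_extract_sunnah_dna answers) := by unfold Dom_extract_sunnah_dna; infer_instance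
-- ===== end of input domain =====

-- B drops A's accumulator dict: each of the four fields is resolved by scanning the
-- answers in reverse and taking the first match (= A's last-wins overwrite).

-- ===== PORT A =====
-- the module constant _SUNNAH_DNA_MAP (shared data, used by both versions)
def dnaMap : PySem.Dict String (PySem.Dict String String) :=
  PySem.Dict.ofList
    [("HP_01", PySem.Dict.ofList [("A","consistent"),("B","basic"),("C","irregular"),("D","developing")]),
     ("HP_09", PySem.Dict.ofList [("A","sunnah"),("B","aware"),("C","neglected"),("D","poor")]),
     ("HP_12", PySem.Dict.ofList [("A","sunnah"),("B","screen"),("C","no_routine"),("D","late_night")]),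
     ("HP_07", PySem.Dict.ofList [("A","strong"),("B","moderate"),("C","weak"),("D","disconnected")])]

def extract_sunnah_dna (answers : List (List (String × String))) : List (String × String) :=
  let selected : PySem.Dict String String :=
    answers.foldl (fun sel ans =>
      match dnaMap.get? ((ans.lookup "question_id").getD "") with
      | some m => sel.insert ((ans.lookup "question_id").getD "")
                             (m.getD (PySem.Str.upper ((ans.lookup "selected_label").getD "")) "unknown")
      | none => sel) PySem.Dict.empty
  [("ibadah",   selected.getD "HP_01" "unknown"),
   ("eating",   selected.getD "HP_09" "unknown"),
   ("sleeping", selected.getD "HP_12" "unknown"),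
   ("social",   selected.getD "HP_07" "unknown")]

-- ===== PORT B =====
-- B's inner 'find': loop over reversed(answers) with an early return = find? on the reverse
def dnaFind (answers : List (List (String × String))) (qid : String) : String :=
  match answers.reverse.find? (fun a => ((a.lookup "question_id").getD "") == qid) with
  | some a => (dnaMap.getD qid PySem.Dict.empty).getD
                (PySem.Str.upper ((a.lookup "selected_label").getD "")) "unknown"
  | none => "unknown"

def extract_sunnah_dna_alt (answers : List (List (String × String))) : List (String × String) :=
  [("ibadah",   dnaFind answers "HP_01"),
   ("eating",   dnaFind answers "HP_09"),
   ("sleeping", dnaFind answers "HP_12"),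
   ("social",   dnaFind answers "HP_07")]

-- ===== PRECONDITION & SPEC =====
def Spec_extract_sunnah_dna (answers : List (List (String × String))) (out : List (String × String)) : Prop := out = extract_sunnah_dna_alt answers
instance (answers : List (List (String × String))) (out : List (String × String)) : Decidable (Spec_extract_sunnah_dna answers out) := by unfold Spec_extract_sunnah_dna; infer_instance

-- ===== CLAIM =====
def Claim_equal_extract_sunnah_dna : Prop := ∀ (answers : List (List (String × String))), Dom_extract_sunnah_dna answers → Spec_extract_sunnah_dna answers (extract_sunnah_dna answers)

-- ===== LEMMAS AND PROOFS =====

-- the bridge: for a key q of dnaMap, A's folded dict holds exactly the translation of the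
-- LAST matching answer, i.e. the first match in the reversed list (B's scan)
theorem dna_fold_eq_find (answers : List (List (String × String)))
    (sel : PySem.Dict String String) (q : String) (hq : dnaMap.contains q = true) :
    (answers.foldl (fun sel ans =>
      match dnaMap.get? ((ans.lookup "question_id").getD "") with
      | some m => sel.insert ((ans.lookup "question_id").getD "")
                             (m.getD (PySem.Str.upper ((ans.lookup "selected_label").getD "")) "unknown")
      | none => sel) sel).get? q
    = match answers.reverse.find? (fun a => ((a.lookup "question_id").getD "") == q) with
      | some a => some ((dnaMap.getD q PySem.Dict.empty).getD
                    (PySem.Str.upper ((a.lookup "selected_label").getD "")) "unknown")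
      | none => sel.get? q := by
  induction answers generalizing sel with
  | nil => rfl
  | cons ans rest ih =>
    simp only [List.foldl_cons, List.reverse_cons, List.find?_append]
    rw [ih]
    cases hfind : rest.reverse.find? (fun a => ((a.lookup "question_id").getD "") == q) with
    | some a => simp only [Option.some_or]
    | none =>
      simp only [Option.none_or, List.find?_cons, List.find?_nil]
      by_cases hqq : ((ans.lookup "question_id").getD "") = q
      · have hp : (((ans.lookup "question_id").getD "") == q) = true := beq_iff_eq.mpr hqq
        rw [hp]
        have hc := PySem.Dict.contains_eq_isSome_get? (d := dnaMap) (k := q)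
        cases hm : dnaMap.get? ((ans.lookup "question_id").getD "") with
        | none => rw [hqq] at hm; rw [hm] at hc; simp [hc] at hq
        | some m =>
          have hd : dnaMap.getD q PySem.Dict.empty = m := by
            rw [PySem.Dict.getD_eq_get?_getD, ← hqq, hm]; rfl
          simp only [PySem.Dict.get?_insert, if_pos hqq.symm, hd]
      · have hp : (((ans.lookup "question_id").getD "") == q) = false := beq_eq_false_iff_ne.mpr hqq
        rw [hp]
        cases hm : dnaMap.get? ((ans.lookup "question_id").getD "") with
        | none => rfl
        | some m =>
          simp only [PySem.Dict.get?_insert, if_neg (Ne.symm hqq)]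

-- ===== VERDICT =====
theorem extract_sunnah_dna_spec : Claim_equal_extract_sunnah_dna := by
  intro answers _
  unfold Spec_extract_sunnah_dna extract_sunnah_dna extract_sunnah_dna_alt dnaFind
  have key : ∀ q, dnaMap.contains q = true →
      (answers.foldl (fun sel ans =>
        match dnaMap.get? ((ans.lookup "question_id").getD "") with
        | some m => sel.insert ((ans.lookup "question_id").getD "")
                               (m.getD (PySem.Str.upper ((ans.lookup "selected_label").getD "")) "unknown")
        | none => sel) PySem.Dict.empty).getD q "unknown"
      = match answers.reverse.find? (fun a => ((a.lookup "question_id").getD "") == q) with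
        | some a => (dnaMap.getD q PySem.Dict.empty).getD
                      (PySem.Str.upper ((a.lookup "selected_label").getD "")) "unknown"
        | none => "unknown" := by
    intro q hq
    rw [PySem.Dict.getD_eq_get?_getD,
        dna_fold_eq_find answers PySem.Dict.empty q hq]
    cases answers.reverse.find? (fun a => ((a.lookup "question_id").getD "") == q) with
    | some a => rfl
    | none => rfl
  simp only [key "HP_01" rfl, key "HP_09" rfl, key "HP_12" rfl, key "HP_07" rfl]
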